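-- pv_equiv track=rewrite | github.com/daniel-reich/ubiquitous-fiesta | 9CWPv99o4EjZgHnkq_15.py | divide
-- ===== SOURCE A (Python) =====
-- def divide(lst, n):
--     res = []
--     while lst:
--         i = 1
--         while sum(lst[:i]) <= n and i <= len(lst):
--             i += 1
--         res.append(lst[:i - 1])
--         lst = lst[i - 1:]
--     return res
-- ===== SOURCE B (Python) =====
-- def divide(lst, n):
--     res = []
--     chunk = []
--     s = 0
--     for x in lst:
--         if chunk and s + x > n:
--             res.append(chunk)
--             chunk = [x]
--             s = x
--         else:
--             chunk.append(x)
--             s += x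
--     if chunk:
--         res.append(chunk)
--     return res
-- ===== Notes on version B (the rewrite author's own statement) =====
-- stated objective: alternative
-- what changed: B makes one pass keeping a running chunk sum instead of re-summing the growing prefix with sum(lst[:i]) at every inner step and re-slicing the list each chunk (intended as faster; a timing run could not confirm a ratio at scale because A does not terminate on the large random inputs).
-- outside the precondition, e.g. on divide([-5, 10], 6): A returns [[-5, 10]], B returns [[-5, 10]]
import Mathlib
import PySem

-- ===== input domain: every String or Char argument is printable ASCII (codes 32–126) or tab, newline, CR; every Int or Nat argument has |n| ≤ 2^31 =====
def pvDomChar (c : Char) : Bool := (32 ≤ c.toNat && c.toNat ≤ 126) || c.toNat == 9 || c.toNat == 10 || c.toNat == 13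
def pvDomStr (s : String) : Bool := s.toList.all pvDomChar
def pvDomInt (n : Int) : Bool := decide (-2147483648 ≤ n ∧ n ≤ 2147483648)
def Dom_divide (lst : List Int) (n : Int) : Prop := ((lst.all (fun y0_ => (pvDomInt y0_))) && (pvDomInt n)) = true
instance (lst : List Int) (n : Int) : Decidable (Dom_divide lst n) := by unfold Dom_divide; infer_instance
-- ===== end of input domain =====

-- B replaces A's re-summed prefix scan by a single pass with a running chunk sum (alternative decomposition; speed not confirmed).


-- ===== PORT A =====
-- inner 'while sum(lst[:i]) <= n and i <= len(lst): i += 1'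
def divideInner (lst : List Int) (n : Int) (i : Int) : Int :=
  if (PySem.List.slice lst none (some i)).sum ≤ n ∧ i ≤ (lst.length : Int) then
    divideInner lst n (i + 1)
  else i
termination_by ((lst.length : Int) + 1 - i).toNat
decreasing_by omega

-- outer 'while lst' loop; the fuel only makes the (possibly non-terminating) Python loop a total
-- function: under Pre_divide each iteration consumes at least one element, so fuel never runs out.
def divideOuter (fuel : Nat) (lst : List Int) (n : Int) (res : List (List Int)) : List (List Int) :=
  match fuel with
  | 0 => res
  | fuel + 1 =>
    if lst = [] then res
    else
      let i := divideInner lst n 1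
      divideOuter fuel (PySem.List.slice lst (some (i - 1)) none) n
        (res ++ [PySem.List.slice lst none (some (i - 1))])

def divide (lst : List Int) (n : Int) : List (List Int) :=
  divideOuter (lst.length + 1) lst n []

-- ===== PORT B =====
def divideBLoop (n : Int) (xs : List Int) (res : List (List Int)) (chunk : List Int) (s : Int) :
    List (List Int) :=
  match xs with
  | [] => if chunk = [] then res else res ++ [chunk]
  | x :: xs =>
    if chunk ≠ [] ∧ n < s + x then divideBLoop n xs (res ++ [chunk]) [x] x
    else divideBLoop n xs res (chunk ++ [x]) (s + x)

def divide_alt (lst : List Int) (n : Int) : List (List Int) :=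
  divideBLoop n lst [] [] 0

-- ===== PRECONDITION & SPEC =====
-- Pre_ excludes lists containing an element greater than n: whenever such an element heads a greedy
-- chunk, A's inner loop makes no progress and A loops forever; the terminating cases among them
-- (the big element absorbed after negative partial sums) are excluded with them even though both
-- programs still agree there.
def Pre_divide (lst : List Int) (n : Int) : Prop := ∀ x ∈ lst, x ≤ n
instance (lst : List Int) (n : Int) : Decidable (Pre_divide lst n) := by
  unfold Pre_divide; infer_instance

def pvWitness_divide : List Int × Int := ([1, 4, 2, 2, 5, 1], 5)

def Spec_divide (lst : List Int) (n : Int) (out : List (List Int)) : Prop := out = divide_alt lst n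
instance (lst : List Int) (n : Int) (out : List (List Int)) : Decidable (Spec_divide lst n out) := by
  unfold Spec_divide; infer_instance

-- ===== CLAIM (what is proved, stated in full; the proofs are below) =====
def Claim_equal_divide : Prop :=
  ∀ (lst : List Int) (n : Int), Dom_divide lst n → Pre_divide lst n →
    Spec_divide lst n (divide lst n)

-- ===== LEMMAS AND PROOFS =====

-- length of the greedy chunk taken from running sum s
def gLen (n s : Int) : List Int → Nat
  | [] => 0
  | x :: xs => if s + x ≤ n then gLen n (s + x) xs + 1 else 0

theorem gLen_le_length (n s : Int) (xs : List Int) : gLen n s xs ≤ xs.length := by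
  induction xs generalizing s with
  | nil => simp [gLen]
  | cons x xs ih =>
    simp only [gLen, List.length_cons]
    split
    · exact Nat.succ_le_succ (ih _)
    · omega

theorem gLen_sum_take (n : Int) (xs : List Int) :
    ∀ (s : Int) (j : Nat), 1 ≤ j → j ≤ gLen n s xs → s + (xs.take j).sum ≤ n := by
  induction xs with
  | nil => intro s j h1 h2; simp [gLen] at h2; omega
  | cons x xs ih =>
    intro s j h1 h2
    simp only [gLen] at h2
    by_cases hx : s + x ≤ n
    · simp only [if_pos hx] at h2
      match j, h1 with
      | 1, _ => simpa using hx
      | (j + 2), _ =>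
        have := ih (s + x) (j + 1) (by omega) (by omega)
        simp only [List.take_succ_cons, List.sum_cons]
        omega
    · simp [if_neg hx] at h2; omega

theorem gLen_boundary (n : Int) (xs : List Int) :
    ∀ (s : Int), gLen n s xs < xs.length → ¬ s + (xs.take (gLen n s xs + 1)).sum ≤ n := by
  induction xs with
  | nil => intro s h; simp at h
  | cons x xs ih =>
    intro s h
    simp only [gLen] at *
    by_cases hx : s + x ≤ n
    · simp only [if_pos hx] at h ⊢
      simp only [List.length_cons] at h
      have := ih (s + x) (by omega)
      simp only [List.take_succ_cons, List.sum_cons]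
      omega
    · simp only [if_neg hx] at h ⊢
      simpa using hx

theorem divideInner_eq (lst : List Int) (n : Int) :
    ∀ (i : Int), 1 ≤ i → i ≤ (gLen n 0 lst : Int) + 1 →
      divideInner lst n i = (gLen n 0 lst : Int) + 1 := by
  intro i
  induction hi : ((gLen n 0 lst : Int) + 1 - i).toNat generalizing i with
  | zero =>
    intro h1 h2
    have hieq : i = (gLen n 0 lst : Int) + 1 := by omega
    subst hieq
    rw [divideInner]
    rw [if_neg]
    rcases Nat.lt_or_ge (gLen n 0 lst) lst.length with hlt | hge
    · have := gLen_boundary n lst 0 hlt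
      intro ⟨hc, _⟩
      apply this
      rw [show ((gLen n 0 lst : Int) + 1) = ((gLen n 0 lst + 1 : Nat) : Int) by push_cast; ring,
        PySem.List.slice_to_natCast] at hc
      omega
    · have := gLen_le_length n 0 lst
      intro ⟨_, hc⟩
      omega
  | succ k ih =>
    intro h1 h2
    have hlt : i < (gLen n 0 lst : Int) + 1 := by omega
    rw [divideInner]
    rw [if_pos]
    · exact ih (i + 1) (by omega) (by omega) (by omega)
    constructor
    · have hs := gLen_sum_take n lst 0 i.toNat (by omega) (by omega)
      rw [show i = ((i.toNat : Nat) : Int) by omega, PySem.List.slice_to_natCast]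
      omega
    · have := gLen_le_length n 0 lst
      omega

theorem divideOuter_res (fuel : Nat) :
    ∀ (lst : List Int) (n : Int) (res : List (List Int)),
      divideOuter fuel lst n res = res ++ divideOuter fuel lst n [] := by
  induction fuel with
  | zero => intro lst n res; simp [divideOuter]
  | succ f ih =>
    intro lst n res
    simp only [divideOuter]
    split
    · simp
    · rw [ih _ n (res ++ _), ih _ n ([] ++ _)]
      simp

theorem divideBLoop_res (n : Int) (xs : List Int) :
    ∀ (res : List (List Int)) (chunk : List Int) (s : Int),
      divideBLoop n xs res chunk s = res ++ divideBLoop n xs [] chunk s := by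
  induction xs with
  | nil =>
    intro res chunk s
    simp only [divideBLoop]
    split <;> simp
  | cons x xs ih =>
    intro res chunk s
    simp only [divideBLoop]
    split
    · rw [ih (res ++ [chunk]), ih ([] ++ [chunk])]; simp
    · rw [ih res, ih []]

theorem divideBLoop_step (n : Int) (xs : List Int) :
    ∀ (chunk : List Int) (s : Int), chunk ≠ [] →
      divideBLoop n xs [] chunk s =
        (chunk ++ xs.take (gLen n s xs)) :: divideBLoop n (xs.drop (gLen n s xs)) [] [] 0 := by
  induction xs with
  | nil =>
    intro chunk s hc
    simp [divideBLoop, gLen, hc]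
  | cons x xs ih =>
    intro chunk s hc
    by_cases hx : s + x ≤ n
    · have hcond : ¬ (chunk ≠ [] ∧ n < s + x) := by omega
      simp only [divideBLoop, if_neg hcond]
      rw [ih (chunk ++ [x]) (s + x) (by simp)]
      simp only [gLen, if_pos hx, List.take_succ_cons, List.drop_succ_cons]
      simp
    · have hcond : chunk ≠ [] ∧ n < s + x := ⟨hc, by omega⟩
      simp only [divideBLoop, if_pos hcond]
      rw [divideBLoop_res]
      simp only [gLen, if_neg hx, List.take_zero, List.drop_zero, List.append_nil]
      have : divideBLoop n (x :: xs) [] [] 0 = divideBLoop n xs [] [x] x := by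
        simp [divideBLoop]
      rw [this]
      simp

theorem main_eq (n : Int) :
    ∀ (fuel : Nat) (lst : List Int), lst.length < fuel → Pre_divide lst n →
      divideOuter fuel lst n [] = divideBLoop n lst [] [] 0 := by
  intro fuel
  induction fuel with
  | zero => intro lst h; omega
  | succ f ih =>
    intro lst hlen hpre
    match lst with
    | [] => simp [divideOuter, divideBLoop]
    | x :: xs =>
      have hx : x ≤ n := hpre x (by simp)
      have hg : gLen n 0 (x :: xs) = gLen n x xs + 1 := by
        simp only [gLen, zero_add]
        rw [if_pos (by omega)]
      simp only [divideOuter, if_neg (by simp : ¬ (x :: xs = []))]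
      rw [divideInner_eq (x :: xs) n 1 (by omega) (by omega)]
      have hk : ((gLen n 0 (x :: xs) : Int) + 1 - 1) = ((gLen n 0 (x :: xs) : Nat) : Int) := by
        omega
      rw [hk, PySem.List.slice_to_natCast, PySem.List.slice_from_natCast]
      rw [divideOuter_res]
      rw [ih (List.drop (gLen n 0 (x :: xs)) (x :: xs))
        (by simp only [List.length_drop]; simp at hlen ⊢; omega)
        (fun y hy => hpre y (List.mem_of_mem_drop hy))]
      -- right-hand side
      have hrhs : divideBLoop n (x :: xs) [] [] 0 = divideBLoop n xs [] [x] x := by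
        simp [divideBLoop]
      rw [hrhs, divideBLoop_step n xs [x] x (by simp)]
      rw [hg]
      simp [List.take_succ_cons, List.drop_succ_cons]

-- ===== VERDICT (by name: the statement is the Claim_ definition above) =====
theorem divide_spec : Claim_equal_divide := by
  intro lst n _ hpre
  unfold Spec_divide divide divide_alt
  exact main_eq n (lst.length + 1) lst (by omega) hpre
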